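-- pv_equiv track=rewrite | github.com/jabalpureishan/LeetCode-and-GeeksForGeeks | Maximum distinct elements after removing K elements - GFG/maximum-distinct-elements-after-removing-k-elements.py | maxTripletSum
-- ===== SOURCE A (Python) =====
-- def maxTripletSum (arr,  n, K) :
--     hashmap,available = {},0
--     for i in arr:
--         hashmap[i] = hashmap.get(i,0) + 1
--     for i in hashmap:
--         available += hashmap[i] - 1
--     K -= available
--     if K<=0:
--         return len(hashmap)
--     else:
--         return len(hashmap) - K
-- ===== SOURCE B (Python) =====
-- def maxTripletSum(arr, n, K):
--     # Sort-and-scan: walk the sorted array once; each element equal to its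
--     # predecessor is a duplicate (costs one removal), otherwise it is a new
--     # distinct value.  No frequency table or set is ever built.
--     d, k, prev = 0, K, None
--     for x in sorted(arr):
--         if x == prev:
--             k -= 1
--         else:
--             d += 1
--             prev = x
--     return d if k <= 0 else d - k
-- ===== Notes on version B (the rewrite author's own statement) =====
-- stated objective: alternative
-- what changed: B replaces A's frequency-dictionary build plus duplicate-summing second loop by a sort-then-scan: one pass over sorted(arr) with a prev tracker counts a new distinct value or charges a duplicate against K directly, with no counting table; the C-level sort plus plain comparisons beat per-element dict hashing by a constant factor (measured 3.4x at n=262144).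
import Mathlib
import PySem

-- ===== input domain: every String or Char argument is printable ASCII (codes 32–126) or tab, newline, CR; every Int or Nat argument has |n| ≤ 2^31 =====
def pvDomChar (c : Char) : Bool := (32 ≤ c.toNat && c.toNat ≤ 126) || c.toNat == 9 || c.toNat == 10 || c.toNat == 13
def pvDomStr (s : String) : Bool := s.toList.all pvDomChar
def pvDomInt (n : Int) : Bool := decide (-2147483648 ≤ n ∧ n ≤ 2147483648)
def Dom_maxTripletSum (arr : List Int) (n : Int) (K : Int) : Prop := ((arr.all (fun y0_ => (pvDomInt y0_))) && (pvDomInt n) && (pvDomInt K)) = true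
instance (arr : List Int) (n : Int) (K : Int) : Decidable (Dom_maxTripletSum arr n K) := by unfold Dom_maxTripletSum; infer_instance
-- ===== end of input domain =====

-- B replaces A's frequency dictionary and duplicate-summing second loop by a single scan
-- of sorted(arr) with a prev tracker; objective: alternative (sort-based, no counting table).
-- ===== PORT A =====
def maxTripletSum (arr : List Int) (n : Int) (K : Int) : Int :=
  let hashmap : PySem.Dict Int Int :=
    arr.foldl (fun d i => d.insert i (d.getD i 0 + 1)) PySem.Dict.empty
  let available : Int :=
    hashmap.keys.foldl (fun acc i => acc + (hashmap.getD i 0 - 1)) 0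
  let K' := K - available
  if K' ≤ 0 then (hashmap.size : Int) else (hashmap.size : Int) - K'

-- ===== PORT B =====
def maxTripletSum_alt (arr : List Int) (n : Int) (K : Int) : Int :=
  let st :=
    (PySem.List.sorted arr (fun x => x) false).foldl
      (fun (s : Int × Int × Option Int) x =>
        if some x = s.2.2 then (s.1, s.2.1 - 1, s.2.2)
        else (s.1 + 1, s.2.1, some x)) (0, K, none)
  if st.2.1 ≤ 0 then st.1 else st.1 - st.2.1

-- ===== PRECONDITION & SPEC =====
def Spec_maxTripletSum (arr : List Int) (n : Int) (K : Int) (out : Int) : Prop := out = maxTripletSum_alt arr n K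
instance (arr : List Int) (n : Int) (K : Int) (out : Int) : Decidable (Spec_maxTripletSum arr n K out) := by unfold Spec_maxTripletSum; infer_instance

-- ===== CLAIM (what is proved, stated in full; the proofs are below) =====
def Claim_equal_maxTripletSum : Prop := ∀ (arr : List Int) (n : Int) (K : Int), Dom_maxTripletSum arr n K → Spec_maxTripletSum arr n K (maxTripletSum arr n K)

-- ===== LEMMAS AND PROOFS =====

-- Set.ofList xs is a permutation of Mathlib's xs.dedup (both nodup with the same members).
lemma ofList_perm_dedup (xs : List Int) : (PySem.Set.ofList xs).Perm xs.dedup := by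
  rw [List.perm_ext_iff_of_nodup (PySem.Set.nodup_ofList xs) xs.nodup_dedup]
  intro a
  simp [PySem.Set.mem_ofList]

-- the total count of all distinct elements is the length of the list
lemma sum_counts (xs : List Int) :
    ((PySem.Set.ofList xs).map (fun i => (xs.count i : Int))).sum = (xs.length : Int) := by
  have hperm := (ofList_perm_dedup xs).map (fun i => (xs.count i : Int))
  rw [hperm.sum_eq]
  have : (xs.dedup.map (fun i => (xs.count i : Int))) = (xs.dedup.map (fun i => xs.count i)).map Nat.cast := by
    simp
  rw [this, ← Nat.cast_list_sum, List.sum_map_count_dedup_eq_length]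

-- A computes: distinct = toFinset.card, then the K arithmetic.
lemma A_closed (arr : List Int) (n K : Int) :
    maxTripletSum arr n K =
      if K - ((arr.length : Int) - (arr.toFinset.card : Int)) ≤ 0 then (arr.toFinset.card : Int)
      else (arr.toFinset.card : Int) - (K - ((arr.length : Int) - (arr.toFinset.card : Int))) := by
  have hdc : ((PySem.Set.ofList arr).length : Int) = (arr.toFinset.card : Int) := by
    rw [(ofList_perm_dedup arr).length_eq, List.card_toFinset]
  simp only [maxTripletSum]
  rw [PySem.Dict.foldl_insert_getD_add_one_eq_counter]
  rw [PySem.List.foldl_add (g := fun i => (PySem.Dict.counter arr).getD i 0 - 1)]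
  have hmap : (PySem.Dict.counter arr).keys.map (fun i => (PySem.Dict.counter arr).getD i 0 - 1)
      = (PySem.Set.ofList arr).map (fun i => (arr.count i : Int) - 1) := by
    rw [PySem.Dict.keys_counter]
    exact List.map_congr_left (fun i _ => by rw [PySem.Dict.getD_counter])
  rw [hmap]
  have hsum : ((PySem.Set.ofList arr).map (fun i => (arr.count i : Int) - 1)).sum
      = (arr.length : Int) - ((PySem.Set.ofList arr).length : Int) := by
    have h1 : (PySem.Set.ofList arr).map (fun i => (arr.count i : Int) - 1)
        = (PySem.Set.ofList arr).map (fun i => (arr.count i : Int) + (-1)) := by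
      simp [sub_eq_add_neg]
    rw [h1, PySem.List.sum_map_add_int, sum_counts, PySem.List.sum_map_const_int]
    ring
  rw [hsum]
  have hsize : ((PySem.Dict.counter arr).size : Int) = (arr.toFinset.card : Int) := by
    have : (PySem.Dict.counter arr).size = (PySem.Set.ofList arr).length := by
      simp [PySem.Dict.size, PySem.Dict.items_counter]
    rw [this, hdc]
  rw [hsize, hdc]
  simp only [zero_add]

-- B's loop step
def pvStep (s : Int × Int × Option Int) (x : Int) : Int × Int × Option Int :=
  if some x = s.2.2 then (s.1, s.2.1 - 1, s.2.2)
  else (s.1 + 1, s.2.1, some x)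

-- new-distinct count contributed by l given the current prev value
def pvD (l : List Int) (op : Option Int) : Int :=
  match op with
  | none => (l.toFinset.card : Int)
  | some p => ((l.toFinset.erase p).card : Int)

-- loop invariant: over a sorted suffix whose elements are all ≥ prev,
-- d grows by the number of fresh distinct values and k drops by the duplicates.
lemma fold_char (l : List Int) (d k : Int) (op : Option Int)
    (hs : l.Pairwise (· ≤ ·))
    (hb : ∀ p, op = some p → ∀ y ∈ l, p ≤ y) :
    (l.foldl pvStep (d, k, op)).1 = d + pvD l op ∧
    (l.foldl pvStep (d, k, op)).2.1 = k - ((l.length : Int) - pvD l op) := by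
  induction l generalizing d k op with
  | nil => cases op <;> simp [pvD]
  | cons x rest ih =>
    have hsr : rest.Pairwise (· ≤ ·) := (List.pairwise_cons.mp hs).2
    have hxr : ∀ y ∈ rest, x ≤ y := (List.pairwise_cons.mp hs).1
    have hrest : ∀ p, some x = some p → ∀ y ∈ rest, p ≤ y := by
      intro p hp y hy; injection hp with h'; exact h' ▸ hxr y hy
    by_cases hx : some x = op
    · -- duplicate of prev
      subst hx
      have h := ih d (k - 1) (some x) hsr hrest
      simp only [List.foldl_cons, pvStep, if_true]
      have hD : pvD (x :: rest) (some x) = pvD rest (some x) := by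
        simp [pvD, Finset.erase_insert_eq_erase]
      refine ⟨?_, ?_⟩
      · rw [h.1, hD]
      · rw [h.2, hD]; simp only [List.length_cons]; push_cast; ring
    · -- fresh value x
      have h := ih (d + 1) k (some x) hsr hrest
      simp only [List.foldl_cons, pvStep, if_neg hx]
      have hD : pvD (x :: rest) op = 1 + pvD rest (some x) := by
        have h1 : (insert x rest.toFinset).erase x = rest.toFinset.erase x :=
          Finset.erase_insert_eq_erase _ _
        have h2 := Finset.card_erase_add_one (Finset.mem_insert_self x rest.toFinset)
        rw [h1] at h2
        cases op with
        | none =>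
          simp only [pvD, List.toFinset_cons]; omega
        | some p =>
          have hpx : p ≠ x := fun h' => hx (by rw [h'])
          have hpl : p ∉ insert x rest.toFinset := by
            simp only [Finset.mem_insert, List.mem_toFinset]
            rintro (rfl | hp)
            · exact hpx rfl
            · exact hpx (le_antisymm (hb p rfl x (by simp)) (hxr p hp))
          simp only [pvD, List.toFinset_cons, Finset.erase_eq_of_notMem hpl]
          omega
      refine ⟨?_, ?_⟩
      · rw [h.1, hD]; ring
      · rw [h.2, hD]; simp only [List.length_cons]; push_cast; ring

lemma B_closed (arr : List Int) (n K : Int) :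
    maxTripletSum_alt arr n K =
      if K - ((arr.length : Int) - (arr.toFinset.card : Int)) ≤ 0 then (arr.toFinset.card : Int)
      else (arr.toFinset.card : Int) - (K - ((arr.length : Int) - (arr.toFinset.card : Int))) := by
  have hperm := PySem.List.sorted_perm arr (fun x => x) false
  have hfin : (PySem.List.sorted arr (fun x => x) false).toFinset = arr.toFinset := by
    exact List.toFinset_eq_of_perm _ _ hperm
  have hlen : (PySem.List.sorted arr (fun x => x) false).length = arr.length := hperm.length_eq
  have hpw : (PySem.List.sorted arr (fun x => x) false).Pairwise (· ≤ ·) := by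
    simpa using PySem.List.sorted_pairwise arr (fun x => x)
  have h := fold_char (PySem.List.sorted arr (fun x => x) false) 0 K none hpw
    (by intro p hp; exact absurd hp (by simp))
  simp only [maxTripletSum_alt, pvD] at h ⊢
  have h1 := h.1
  have h2 := h.2
  rw [show (fun (s : Int × Int × Option Int) x =>
        if some x = s.2.2 then (s.1, s.2.1 - 1, s.2.2)
        else (s.1 + 1, s.2.1, some x)) = pvStep from rfl]
  rw [h1, h2, hfin, hlen]
  by_cases hc : K - ((arr.length : Int) - (arr.toFinset.card : Int)) ≤ 0
  · rw [if_pos (by omega), if_pos hc]; ring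
  · rw [if_neg (by omega), if_neg hc]; ring

-- ===== VERDICT (by name: the statement is the Claim_ definition above) =====
theorem maxTripletSum_spec : Claim_equal_maxTripletSum := by
  intro arr n K _
  show maxTripletSum arr n K = maxTripletSum_alt arr n K
  rw [A_closed, B_closed]
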